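-- pv_equiv track=rewrite | github.com/RamsesXVII/tracerote2.0 | test.py | getTracerouteToIDs
-- ===== SOURCE A (Python) =====
-- def getTracerouteToIDs(pair,pairToTime2traceroute):
-- 	'''It returns two maps in the form of traceroute to id and vice versa'''
-- 	tracerouteToTimestamp=dict()
-- 	tracerouteToId=dict()
-- 	idToTraceroute=dict()
--
-- 	idCounter=100
-- 	timestampToTracerouteAndRTT=pairToTime2traceroute[pair]
--
-- 	for timestamp in sorted(timestampToTracerouteAndRTT.keys()):
-- 		traceroute=timestampToTracerouteAndRTT[timestamp][0]
--
-- 		if traceroute not in tracerouteToId: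
-- 			tracerouteToId[traceroute]=idCounter
-- 			idToTraceroute[idCounter]=traceroute
--
-- 			idCounter+=100
-- 	return tracerouteToId,idToTraceroute
-- ===== SOURCE B (Python) =====
-- def getTracerouteToIDs(pair, pairToTime2traceroute):
--     '''It returns two maps in the form of traceroute to id and vice versa'''
--     minTs = {}
--     for timestamp, tracerouteAndRTT in pairToTime2traceroute[pair].items():
--         traceroute = tracerouteAndRTT[0]
--         minTs[traceroute] = min(minTs.get(traceroute, timestamp), timestamp)
--     order = sorted(minTs, key=lambda tr: minTs[tr])
--     tracerouteToId = {tr: 100 * (i + 1) for i, tr in enumerate(order)}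
--     idToTraceroute = {100 * (i + 1): tr for i, tr in enumerate(order)}
--     return tracerouteToId, idToTraceroute
-- ===== Notes on version B (the rewrite author's own statement) =====
-- stated objective: alternative
-- what changed: A sorts every timestamp and walks them with a seen-membership check and repeated dict lookups; B makes one unsorted pass building a traceroute-to-minimum-timestamp index, sorts only the unique traceroutes by that minimum, and builds both id maps by enumeration.
import Mathlib
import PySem

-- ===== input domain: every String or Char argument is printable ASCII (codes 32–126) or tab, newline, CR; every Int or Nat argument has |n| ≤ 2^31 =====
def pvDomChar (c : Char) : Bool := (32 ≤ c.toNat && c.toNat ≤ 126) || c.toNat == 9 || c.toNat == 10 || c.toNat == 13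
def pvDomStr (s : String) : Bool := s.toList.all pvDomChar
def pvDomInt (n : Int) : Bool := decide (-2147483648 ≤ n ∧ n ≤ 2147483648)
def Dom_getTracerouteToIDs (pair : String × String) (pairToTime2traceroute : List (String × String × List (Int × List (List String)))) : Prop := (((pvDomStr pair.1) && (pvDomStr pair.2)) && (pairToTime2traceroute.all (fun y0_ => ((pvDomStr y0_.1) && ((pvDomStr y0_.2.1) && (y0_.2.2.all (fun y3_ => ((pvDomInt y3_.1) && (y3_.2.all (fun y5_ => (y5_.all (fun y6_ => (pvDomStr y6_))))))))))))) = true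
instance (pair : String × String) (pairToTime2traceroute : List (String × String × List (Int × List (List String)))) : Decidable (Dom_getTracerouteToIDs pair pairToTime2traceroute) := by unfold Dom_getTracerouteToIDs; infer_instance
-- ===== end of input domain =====

-- B replaces A's "sort all timestamps, then look each one up with a seen-check" loop by a one-pass
-- min-timestamp index per traceroute followed by a sort of the unique traceroutes only (objective:
-- alternative decomposition; same observable return value).

-- shared argument extraction: the Python expression pairToTime2traceroute[pair] (a dict lookup)
def pvOuterDict (pairToTime2traceroute : List (String × String × List (Int × List (List String)))) : PySem.Dict (String × String) (List (Int × List (List String))) :=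
  PySem.Dict.ofList (pairToTime2traceroute.map (fun e => ((e.1, e.2.1), e.2.2)))

def pvInnerDict (pair : String × String) (pairToTime2traceroute : List (String × String × List (Int × List (List String)))) : PySem.Dict Int (List (List String)) :=
  PySem.Dict.ofList ((pvOuterDict pairToTime2traceroute).getD pair [])

-- ===== PORT A =====
def getTracerouteToIDs (pair : String × String) (pairToTime2traceroute : List (String × String × List (Int × List (List String)))) : (List (List String × Int)) × (List (Int × List String)) :=
  let d := pvInnerDict pair pairToTime2traceroute
  let st := (PySem.List.sorted d.keys (fun x => x) false).foldl
    (fun (st : PySem.Dict (List String) Int × PySem.Dict Int (List String) × Int) ts =>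
      let tr := PySem.List.pyGetD (d.getD ts []) 0 []
      if st.1.contains tr then st
      else (st.1.insert tr st.2.2, st.2.1.insert st.2.2 tr, st.2.2 + 100))
    (PySem.Dict.empty, PySem.Dict.empty, (100 : Int))
  (st.1.items, st.2.1.items)

-- ===== PORT B =====
def getTracerouteToIDs_alt (pair : String × String) (pairToTime2traceroute : List (String × String × List (Int × List (List String)))) : (List (List String × Int)) × (List (Int × List String)) :=
  let d := pvInnerDict pair pairToTime2traceroute
  let minTs : PySem.Dict (List String) Int := d.items.foldl
    (fun mt p => mt.insert (PySem.List.pyGetD p.2 0 []) (min (mt.getD (PySem.List.pyGetD p.2 0 []) p.1) p.1))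
    PySem.Dict.empty
  let order := PySem.List.sorted minTs.keys (fun tr => minTs.getD tr 0) false
  (((PySem.List.enumerate order 0).foldl (fun (dd : PySem.Dict (List String) Int) p => dd.insert p.2 (100 * (p.1 + 1))) PySem.Dict.empty).items,
   ((PySem.List.enumerate order 0).foldl (fun (dd : PySem.Dict Int (List String)) p => dd.insert (100 * (p.1 + 1)) p.2) PySem.Dict.empty).items)

-- ===== PRECONDITION & SPEC =====
-- Pre_ excludes exactly the inputs where the Python A raises: a KeyError when pair is not a key of
-- the outer dict, and an IndexError when some timestamp of the selected inner dict maps to an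
-- empty list (so [0] fails).
def Pre_getTracerouteToIDs (pair : String × String) (pairToTime2traceroute : List (String × String × List (Int × List (List String)))) : Prop :=
  (pvOuterDict pairToTime2traceroute).contains pair = true ∧
  ∀ v ∈ (pvInnerDict pair pairToTime2traceroute).values, v ≠ []
instance (pair : String × String) (pairToTime2traceroute : List (String × String × List (Int × List (List String)))) : Decidable (Pre_getTracerouteToIDs pair pairToTime2traceroute) := by unfold Pre_getTracerouteToIDs; infer_instance

def pvWitness_getTracerouteToIDs : (String × String) × (List (String × String × List (Int × List (List String)))) :=
  (("a", "b"), [("a", "b", [(2, [["h1", "h2"]]), (1, [["h1", "h2"], ["9"]]), (3, [["z"]])])])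

def Spec_getTracerouteToIDs (pair : String × String) (pairToTime2traceroute : List (String × String × List (Int × List (List String)))) (out : (List (List String × Int)) × (List (Int × List String))) : Prop := out = getTracerouteToIDs_alt pair pairToTime2traceroute
instance (pair : String × String) (pairToTime2traceroute : List (String × String × List (Int × List (List String)))) (out : (List (List String × Int)) × (List (Int × List String))) : Decidable (Spec_getTracerouteToIDs pair pairToTime2traceroute out) := by unfold Spec_getTracerouteToIDs; infer_instance

-- ===== CLAIM (what is proved, stated in full; the proofs are below) =====
def Claim_equal_getTracerouteToIDs : Prop := ∀ (pair : String × String) (pairToTime2traceroute : List (String × String × List (Int × List (List String)))), Dom_getTracerouteToIDs pair pairToTime2traceroute → Pre_getTracerouteToIDs pair pairToTime2traceroute → Spec_getTracerouteToIDs pair pairToTime2traceroute (getTracerouteToIDs pair pairToTime2traceroute)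

-- ===== LEMMAS AND PROOFS =====

def trP (p : Int × List (List String)) : List String := PySem.List.pyGetD p.2 0 []
def foldMin (l : List (Int × List (List String))) : PySem.Dict (List String) Int :=
  l.foldl (fun mt p => mt.insert (trP p) (min (mt.getD (trP p) p.1) p.1)) PySem.Dict.empty

lemma keys_foldMin (l : List (Int × List (List String))) : (foldMin l).keys = PySem.Set.ofList (l.map trP) := by
  unfold foldMin
  rw [PySem.Dict.keys_foldl_insert_key]
  simp [PySem.Set.update_nil_left]

lemma nodup_keys_foldMin (l : List (Int × List (List String))) : (foldMin l).keys.Nodup := by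
  rw [keys_foldMin]; exact PySem.Set.nodup_ofList _

lemma getD_default_eq {κ ν : Type} [BEq κ] [LawfulBEq κ] (d : PySem.Dict κ ν) (k : κ) (h : d.contains k = true) (d1 d2 : ν) : d.getD k d1 = d.getD k d2 := by
  rw [PySem.Dict.contains_eq_isSome_get?] at h
  obtain ⟨v, hv⟩ := Option.isSome_iff_exists.mp h
  rw [PySem.Dict.getD_of_get?_eq_some _ _ hv, PySem.Dict.getD_of_get?_eq_some _ _ hv]

def assign1 (s : List (List String)) : List (List String × Int) :=
  (PySem.List.enumerate s 0).map (fun p => (p.2, 100 * (p.1 + 1)))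
def assign2 (s : List (List String)) : List (Int × List String) :=
  (PySem.List.enumerate s 0).map (fun p => (100 * (p.1 + 1), p.2))

lemma assign1_append (s : List (List String)) (x : List String) :
    assign1 (s ++ [x]) = assign1 s ++ [(x, 100 * ((s.length : Int) + 1))] := by
  simp [assign1, PySem.List.enumerate_append, PySem.List.enumerate_cons, PySem.List.enumerate_nil]

lemma assign2_append (s : List (List String)) (x : List String) :
    assign2 (s ++ [x]) = assign2 s ++ [(100 * ((s.length : Int) + 1), x)] := by
  simp [assign2, PySem.List.enumerate_append, PySem.List.enumerate_cons, PySem.List.enumerate_nil]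

lemma map_fst_assign1 (s : List (List String)) : (assign1 s).map Prod.fst = s := by
  simp [assign1, Function.comp_def]

lemma pv_idxOf_le {α : Type} [BEq α] [LawfulBEq α] (xs : List α) (a : α) (j : Nat) (h : j < xs.length) (ha : xs[j] = a) : xs.idxOf a ≤ j := by
  induction xs generalizing j with
  | nil => simp at h
  | cons x t ih =>
    by_cases hx : a = x
    · simp [hx, List.idxOf_cons_self]
    · rw [List.idxOf_cons_ne _ (fun hh => hx (hh.symm))]
      cases j with
      | zero => simp at ha; exact absurd ha.symm hx
      | succ k => simpa using ih k (by simpa using h) (by simpa using ha)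

lemma pv_pairwise_idxOf {α : Type} [BEq α] [LawfulBEq α] (xs : List α) :
    (PySem.Set.ofList xs).Pairwise (fun a b => xs.idxOf a < xs.idxOf b) := by
  induction xs with
  | nil => simp [PySem.Set.ofList_nil]
  | cons x t ih =>
    rw [PySem.Set.ofList_cons]
    constructor
    · intro b hb
      have hbne : b ≠ x := ((PySem.Set.mem_discard _ _ _).mp hb).2
      have hbmem : b ∈ PySem.Set.ofList t := ((PySem.Set.mem_discard _ _ _).mp hb).1
      rw [List.idxOf_cons_self, List.idxOf_cons_ne _ (fun hh => hbne (hh.symm))]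
      omega
    · have hsub : (PySem.Set.discard (PySem.Set.ofList t) x).Sublist (PySem.Set.ofList t) := by
        simp only [PySem.Set.discard]
        exact List.filter_sublist
      have hpw := ih.sublist hsub
      refine hpw.imp_of_mem ?_
      intro a b ha hb hab
      have hane : a ≠ x := ((PySem.Set.mem_discard _ _ _).mp ha).2
      have hbne : b ≠ x := ((PySem.Set.mem_discard _ _ _).mp hb).2
      rw [List.idxOf_cons_ne _ (fun hh => hane (hh.symm)), List.idxOf_cons_ne _ (fun hh => hbne (hh.symm))]
      omega

lemma foldMin_append (l : List (Int × List (List String))) (q : Int × List (List String)) :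
    foldMin (l ++ [q]) = (foldMin l).insert (trP q) (min ((foldMin l).getD (trP q) q.1) q.1) := by
  unfold foldMin
  rw [List.foldl_append]
  rfl

lemma getD_foldMin_le (l : List (Int × List (List String))) : ∀ p ∈ l, (foldMin l).getD (trP p) 0 ≤ p.1 := by
  induction l using List.reverseRecOn with
  | nil => simp
  | append_singleton l q ih =>
    intro p hp
    rw [foldMin_append]
    rcases List.mem_append.mp hp with hp | hp
    · by_cases he : trP p = trP q
      · rw [he, PySem.Dict.getD_insert_self]
        have hcon : (foldMin l).contains (trP q) = true := by
          rw [PySem.Dict.contains_iff_mem_keys, keys_foldMin, PySem.Set.mem_ofList]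
          exact he ▸ List.mem_map_of_mem hp
        have := getD_default_eq (foldMin l) (trP q) hcon q.1 0
        have h2 := ih p hp
        rw [he] at h2
        calc min ((foldMin l).getD (trP q) q.1) q.1 ≤ (foldMin l).getD (trP q) q.1 := min_le_left _ _
          _ = (foldMin l).getD (trP q) 0 := this
          _ ≤ p.1 := h2
      · rw [PySem.Dict.getD_insert_of_ne _ _ _ he]
        exact ih p hp
    · simp at hp
      subst hp
      rw [PySem.Dict.getD_insert_self]
      exact min_le_right _ _

lemma getD_foldMin_attained (l : List (Int × List (List String))) : ∀ tr ∈ (foldMin l).keys, ∃ p ∈ l, trP p = tr ∧ (foldMin l).getD tr 0 = p.1 := by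
  induction l using List.reverseRecOn with
  | nil => intro tr h; rw [keys_foldMin] at h; simp [PySem.Set.ofList_nil] at h
  | append_singleton l q ih =>
    intro tr htr
    rw [foldMin_append]
    by_cases he : tr = trP q
    · subst he
      rw [PySem.Dict.getD_insert_self]
      by_cases hcon : (foldMin l).contains (trP q) = true
      · have hkey : trP q ∈ (foldMin l).keys := (PySem.Dict.contains_iff_mem_keys _ _).mp hcon
        obtain ⟨p, hp, htrp, hval⟩ := ih (trP q) hkey
        rcases le_total ((foldMin l).getD (trP q) q.1) q.1 with hle | hle
        · refine ⟨p, List.mem_append_left _ hp, htrp, ?_⟩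
          rw [min_eq_left hle, getD_default_eq (foldMin l) (trP q) hcon q.1 0, hval]
        · exact ⟨q, List.mem_append_right _ (by simp), rfl, by rw [min_eq_right hle]⟩
      · have : (foldMin l).getD (trP q) q.1 = q.1 := PySem.Dict.getD_of_not_contains _ _ (by simpa using hcon)
        exact ⟨q, List.mem_append_right _ (by simp), rfl, by rw [this, min_self]⟩
    · rw [PySem.Dict.getD_insert_of_ne _ _ _ he]
      have hkey : tr ∈ (foldMin l).keys := by
        rw [keys_foldMin, PySem.Set.mem_ofList]
        rw [keys_foldMin] at htr
        have := (PySem.Set.mem_ofList _ _).mp htr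
        simp only [List.map_append, List.map_cons, List.map_nil] at this
        rcases List.mem_append.mp this with h | h
        · exact h
        · simp at h; exact absurd h he
      obtain ⟨p, hp, htrp, hval⟩ := ih tr hkey
      exact ⟨p, List.mem_append_left _ hp, htrp, hval⟩

def stepA (st : PySem.Dict (List String) Int × PySem.Dict Int (List String) × Int) (tr : List String) : PySem.Dict (List String) Int × PySem.Dict Int (List String) × Int :=
  if st.1.contains tr then st else (st.1.insert tr st.2.2, st.2.1.insert st.2.2 tr, st.2.2 + 100)

lemma map_fst_assign2 (s : List (List String)) : (assign2 s).map Prod.fst = (PySem.List.enumerate s 0).map (fun p => 100 * (p.1 + 1)) := by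
  simp [assign2, Function.comp_def]

lemma foldA_char (g : Int → List String) (ks : List Int) :
    ks.foldl (fun st ts => stepA st (g ts)) (PySem.Dict.empty, PySem.Dict.empty, (100 : Int)) =
      (PySem.Dict.mk (assign1 (PySem.Set.ofList (ks.map g))),
       PySem.Dict.mk (assign2 (PySem.Set.ofList (ks.map g))),
       (100 : Int) * (((PySem.Set.ofList (ks.map g)).length : Int) + 1)) := by
  induction ks using List.reverseRecOn with
  | nil =>
    simp [assign1, assign2, PySem.Set.ofList_nil, PySem.List.enumerate_nil]
    constructor <;> rfl
  | append_singleton ks q ih =>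
    rw [List.foldl_append, ih]
    simp only [List.foldl_cons, List.foldl_nil, List.map_append, List.map_cons, List.map_nil,
      PySem.Set.ofList_append_singleton]
    set s := PySem.Set.ofList (ks.map g) with hs
    by_cases hmem : g q ∈ s
    · have hcon : (PySem.Dict.mk (assign1 s)).contains (g q) = true := by
        rw [PySem.Dict.contains_iff_mem_keys]
        simpa [PySem.Dict.keys, map_fst_assign1] using hmem
      rw [stepA, if_pos hcon, PySem.Set.add_of_mem hmem]
    · have hcon : (PySem.Dict.mk (assign1 s)).contains (g q) = false := by
        rw [Bool.eq_false_iff, Ne, PySem.Dict.contains_iff_mem_keys]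
        simpa [PySem.Dict.keys, map_fst_assign1] using hmem
      rw [stepA, if_neg (by simp [hcon]), PySem.Set.add_of_not_mem hmem]
      refine Prod.ext ?_ (Prod.ext ?_ ?_) <;> simp only
      · apply PySem.Dict.ext
        rw [PySem.Dict.items_insert_of_not_contains _ _ hcon]
        rw [assign1_append]
      · apply PySem.Dict.ext
        have hcon2 : (PySem.Dict.mk (assign2 s)).contains ((100:Int) * ((s.length : Int) + 1)) = false := by
          rw [Bool.eq_false_iff, Ne, PySem.Dict.contains_iff_mem_keys]
          simp only [PySem.Dict.keys, map_fst_assign2]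
          intro hc
          obtain ⟨p, hp, hpe⟩ := List.mem_map.mp hc
          obtain ⟨k, hk, hpk⟩ := (PySem.List.mem_enumerate_iff _ _ _).mp hp
          have : p.1 = (k : Int) := by rw [hpk]; simp
          have : (100:Int) * ((k:Int) + 1) = 100 * ((s.length:Int) + 1) := by rw [← hpe, this]
          have hklt : (k:Int) < (s.length:Int) := by exact_mod_cast hk
          omega
        rw [PySem.Dict.items_insert_of_not_contains _ _ hcon2]
        rw [assign2_append]
      · simp only [List.length_append, List.length_cons, List.length_nil]
        push_cast
        ring

lemma fold_t2id_char (ord : List (List String)) (hnd : ord.Nodup) :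
    ((PySem.List.enumerate ord 0).foldl (fun (dd : PySem.Dict (List String) Int) p => dd.insert p.2 (100 * (p.1 + 1))) PySem.Dict.empty).items = assign1 ord := by
  rw [PySem.Dict.items_foldl_insert_fresh (PySem.List.enumerate ord 0) (fun p => p.2) (fun p => 100 * (p.1 + 1)) PySem.Dict.empty
    (fun a _ => PySem.Dict.contains_empty _)
    (by rw [PySem.List.map_snd_enumerate]; exact hnd)]
  simp [assign1, PySem.Dict.empty]

lemma fold_id2t_char (ord : List (List String)) :
    ((PySem.List.enumerate ord 0).foldl (fun (dd : PySem.Dict Int (List String)) p => dd.insert (100 * (p.1 + 1)) p.2) PySem.Dict.empty).items = assign2 ord := by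
  rw [PySem.Dict.items_foldl_insert_fresh (PySem.List.enumerate ord 0) (fun p => 100 * (p.1 + 1)) (fun p => p.2) PySem.Dict.empty
    (fun a _ => PySem.Dict.contains_empty _)
    ?_]
  · simp [assign2, PySem.Dict.empty]
  · have hpw := PySem.List.pairwise_lt_enumerate ord 0
    have : (List.map (fun p => 100 * (p.1 + 1)) (PySem.List.enumerate ord 0)).Pairwise (· < ·) := by
      rw [List.pairwise_map]
      exact hpw.imp (fun h => by omega)
    exact List.Pairwise.imp ne_of_lt this

def trD (d : PySem.Dict Int (List (List String))) (ts : Int) : List String := PySem.List.pyGetD (d.getD ts []) 0 []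

lemma order_aux (ks : List Int) (f : Int → List String) (mT : PySem.Dict (List String) Int)
    (hkslt : ks.Pairwise (· < ·))
    (hndk : mT.keys.Nodup)
    (hmem : ∀ a, a ∈ ks.map f ↔ a ∈ mT.keys)
    (hub : ∀ ts ∈ ks, mT.getD (f ts) 0 ≤ ts)
    (hatt : ∀ a ∈ mT.keys, ∃ ts ∈ ks, f ts = a ∧ mT.getD a 0 = ts) :
    PySem.List.sorted mT.keys (fun tr => mT.getD tr 0) false = PySem.Set.ofList (ks.map f) := by
  have hperm : (PySem.Set.ofList (ks.map f)).Perm mT.keys := by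
    rw [List.perm_ext_iff_of_nodup (PySem.Set.nodup_ofList _) hndk]
    intro a
    rw [PySem.Set.mem_ofList]
    exact hmem a
  have hkeyval : ∀ a ∈ PySem.Set.ofList (ks.map f),
      ∃ hlt : (ks.map f).idxOf a < ks.length, mT.getD a 0 = ks[(ks.map f).idxOf a] := by
    intro a ha
    have haxs : a ∈ ks.map f := (PySem.Set.mem_ofList _ _).mp ha
    have hlt' : (ks.map f).idxOf a < (ks.map f).length := List.idxOf_lt_length_iff.mpr haxs
    have hlt : (ks.map f).idxOf a < ks.length := by simpa using hlt'
    refine ⟨hlt, ?_⟩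
    have hgeti : f (ks[(ks.map f).idxOf a]) = a := by
      have h := List.getElem_idxOf hlt'
      rwa [List.getElem_map] at h
    have hb : mT.getD a 0 ≤ ks[(ks.map f).idxOf a] := by
      have := hub (ks[(ks.map f).idxOf a]) (List.getElem_mem hlt)
      rwa [hgeti] at this
    obtain ⟨ts0, hts0, hfts0, hval0⟩ := hatt a ((hmem a).mp haxs)
    obtain ⟨j, hj, hje⟩ := List.mem_iff_getElem.mp hts0
    have hxsj : (ks.map f)[j]'(by simpa using hj) = a := by
      simp only [List.getElem_map]
      rw [hje, hfts0]
    have hij : (ks.map f).idxOf a ≤ j := pv_idxOf_le (ks.map f) a j (by simpa using hj) hxsj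
    have hlb : ks[(ks.map f).idxOf a] ≤ ts0 := by
      rcases Nat.lt_or_ge ((ks.map f).idxOf a) j with hlt2 | hge
      · have := (List.pairwise_iff_getElem.mp hkslt) _ j hlt hj hlt2
        rw [hje] at this
        exact le_of_lt this
      · have heq : (ks.map f).idxOf a = j := le_antisymm hij hge
        cases heq
        exact le_of_eq hje
    rw [hval0]
    exact le_antisymm (hval0 ▸ hb) hlb
  have hpw : (PySem.Set.ofList (ks.map f)).Pairwise
      (fun a b => mT.getD a 0 < mT.getD b 0) := by
    refine (pv_pairwise_idxOf (ks.map f)).imp_of_mem ?_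
    intro a b ha hb hab
    obtain ⟨hia, hva⟩ := hkeyval a ha
    obtain ⟨hib, hvb⟩ := hkeyval b hb
    rw [hva, hvb]
    exact (List.pairwise_iff_getElem.mp hkslt) _ _ hia hib hab
  exact PySem.List.sorted_eq_of_perm_of_pairwise_lt mT.keys (PySem.Set.ofList (ks.map f)) _ hperm hpw

lemma order_eq (d : PySem.Dict Int (List (List String))) (hnd : d.keys.Nodup) :
    PySem.List.sorted (foldMin d.items).keys (fun tr => (foldMin d.items).getD tr 0) false =
      PySem.Set.ofList ((PySem.List.sorted d.keys (fun x => x) false).map (trD d)) := by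
  have hksmem : ∀ ts : Int, ts ∈ PySem.List.sorted d.keys (fun x => x) false ↔ ts ∈ d.keys :=
    fun ts => PySem.List.mem_sorted _ _ _ _
  have hksnd : (PySem.List.sorted d.keys (fun x => x) false).Nodup :=
    ((PySem.List.sorted_perm d.keys (fun x => x) false).nodup_iff).mpr hnd
  have hkslt : (PySem.List.sorted d.keys (fun x => x) false).Pairwise (· < ·) := by
    have h1 := PySem.List.sorted_pairwise d.keys (fun x => x)
    exact (h1.and hksnd).imp (fun h => lt_of_le_of_ne h.1 h.2)
  have htrD : ∀ p ∈ d.items, trD d p.1 = trP p := by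
    intro p hp
    unfold trD trP
    rw [PySem.Dict.getD_of_mem_items d hp hnd]
  have hkeyitem : ∀ ts ∈ d.keys, ∃ p ∈ d.items, p.1 = ts := by
    intro ts hts
    simp only [PySem.Dict.keys] at hts
    obtain ⟨p, hp, hpe⟩ := List.mem_map.mp hts
    exact ⟨p, hp, hpe⟩
  refine order_aux _ _ _ hkslt (nodup_keys_foldMin _) ?_ ?_ ?_
  · intro a
    rw [keys_foldMin, PySem.Set.mem_ofList, List.mem_map, List.mem_map]
    constructor
    · rintro ⟨ts, hts, hfa⟩
      obtain ⟨p, hp, hpe⟩ := hkeyitem ts ((hksmem ts).mp hts)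
      exact ⟨p, hp, by rw [← htrD p hp, hpe, hfa]⟩
    · rintro ⟨p, hp, hpa⟩
      refine ⟨p.1, (hksmem p.1).mpr ?_, by rw [htrD p hp, hpa]⟩
      simp only [PySem.Dict.keys]
      exact List.mem_map_of_mem hp
  · intro ts hts
    obtain ⟨p, hp, hpe⟩ := hkeyitem ts ((hksmem ts).mp hts)
    have := getD_foldMin_le d.items p hp
    rw [← hpe, htrD p hp]
    exact hpe ▸ this
  · intro a ha
    obtain ⟨p0, hp0, htp0, hval0⟩ := getD_foldMin_attained d.items a ha
    refine ⟨p0.1, (hksmem p0.1).mpr ?_, by rw [htrD p0 hp0, htp0], hval0⟩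
    simp only [PySem.Dict.keys]
    exact List.mem_map_of_mem hp0

lemma main_eq (pair : String × String) (m : List (String × String × List (Int × List (List String)))) :
    getTracerouteToIDs pair m = getTracerouteToIDs_alt pair m := by
  have hnd : (pvInnerDict pair m).keys.Nodup := PySem.Dict.nodup_keys_ofList _
  have hA : getTracerouteToIDs pair m =
      (assign1 (PySem.Set.ofList ((PySem.List.sorted (pvInnerDict pair m).keys (fun x => x) false).map (trD (pvInnerDict pair m)))),
       assign2 (PySem.Set.ofList ((PySem.List.sorted (pvInnerDict pair m).keys (fun x => x) false).map (trD (pvInnerDict pair m))))) := by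
    have h : getTracerouteToIDs pair m = (fun st : PySem.Dict (List String) Int × PySem.Dict Int (List String) × Int => (st.1.items, st.2.1.items))
        ((PySem.List.sorted (pvInnerDict pair m).keys (fun x => x) false).foldl
          (fun st ts => stepA st (trD (pvInnerDict pair m) ts))
          (PySem.Dict.empty, PySem.Dict.empty, (100 : Int))) := rfl
    rw [h, foldA_char]
  have hOrd := order_eq (pvInnerDict pair m) hnd
  have hndS : (PySem.Set.ofList ((PySem.List.sorted (pvInnerDict pair m).keys (fun x => x) false).map (trD (pvInnerDict pair m)))).Nodup := PySem.Set.nodup_ofList _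
  have hB : getTracerouteToIDs_alt pair m =
      (assign1 (PySem.Set.ofList ((PySem.List.sorted (pvInnerDict pair m).keys (fun x => x) false).map (trD (pvInnerDict pair m)))),
       assign2 (PySem.Set.ofList ((PySem.List.sorted (pvInnerDict pair m).keys (fun x => x) false).map (trD (pvInnerDict pair m))))) := by
    have h : getTracerouteToIDs_alt pair m =
        (((PySem.List.enumerate (PySem.List.sorted (foldMin (pvInnerDict pair m).items).keys (fun tr => (foldMin (pvInnerDict pair m).items).getD tr 0) false) 0).foldl (fun (dd : PySem.Dict (List String) Int) p => dd.insert p.2 (100 * (p.1 + 1))) PySem.Dict.empty).items,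
         ((PySem.List.enumerate (PySem.List.sorted (foldMin (pvInnerDict pair m).items).keys (fun tr => (foldMin (pvInnerDict pair m).items).getD tr 0) false) 0).foldl (fun (dd : PySem.Dict Int (List String)) p => dd.insert (100 * (p.1 + 1)) p.2) PySem.Dict.empty).items) := rfl
    rw [h, hOrd, fold_t2id_char _ hndS, fold_id2t_char]
  rw [hA, hB]

-- ===== VERDICT (by name: the statement is the Claim_ definition above) =====
theorem getTracerouteToIDs_spec : Claim_equal_getTracerouteToIDs := by
  intro pair m _ _
  unfold Spec_getTracerouteToIDs
  exact main_eq pair m
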